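-- pv_equiv track=rewrite | github.com/ToglivvilgoT/Advent-of-Code-2024 | day5.py | solve
-- ===== SOURCE A (Python) =====
-- def solve(rules, manuals) -> int:
--     ans = 0
--     incorrect = []
--     for manual in manuals:
--         ordered = True
--         prev = set()
--         for page in manual:
--             for illegal in rules.get(page, []):
--                 if illegal in prev:
--                     ordered = False
--                     break
--             prev.add(page)
--             if not ordered:
--                 break
--         if ordered:
--             ans += manual[len(manual) // 2]
--         else:
--             incorrect.append(manual)
--
--     return ans, incorrect
-- ===== SOURCE B (Python) =====
-- def solve(rules, manuals) -> int:
--     ans = 0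
--     incorrect = []
--     for manual in manuals:
--         n = len(manual)
--         bad = any(manual[i] in rules.get(manual[j], [])
--                   for j in range(n) for i in range(j))
--         if bad:
--             incorrect.append(manual)
--         else:
--             ans += manual[n // 2]
--     return ans, incorrect
-- ===== Notes on version B (the rewrite author's own statement) =====
-- stated objective: alternative
-- what changed: B drops A's incremental seen-set with early breaks and instead decides orderedness by a direct brute-force check over all index pairs i < j, testing whether any earlier page is a forbidden successor of a later page; no auxiliary set is maintained.
import Mathlib
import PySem

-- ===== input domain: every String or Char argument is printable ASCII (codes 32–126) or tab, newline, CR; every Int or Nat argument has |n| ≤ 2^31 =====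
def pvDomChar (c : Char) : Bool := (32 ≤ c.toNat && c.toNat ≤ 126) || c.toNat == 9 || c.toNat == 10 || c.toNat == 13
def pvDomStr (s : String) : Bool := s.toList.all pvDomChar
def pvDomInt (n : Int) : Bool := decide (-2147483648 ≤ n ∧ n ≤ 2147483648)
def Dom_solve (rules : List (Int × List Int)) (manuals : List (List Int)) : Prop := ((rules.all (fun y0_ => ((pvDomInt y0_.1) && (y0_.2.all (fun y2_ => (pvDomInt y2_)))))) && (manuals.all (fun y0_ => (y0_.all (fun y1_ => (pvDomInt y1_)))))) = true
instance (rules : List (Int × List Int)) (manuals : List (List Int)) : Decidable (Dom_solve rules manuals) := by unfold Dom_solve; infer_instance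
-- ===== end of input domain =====

-- B replaces A's incremental seen-set walk (with early breaks) by a brute-force check
-- over all index pairs i < j of each manual; no auxiliary set, same results (alternative).

-- ===== PORT A =====
-- rules.get(page, []) on the association-list dict (first match)
def pvGetRules (rules : List (Int × List Int)) (page : Int) : List Int :=
  (PySem.Dict.mk rules).getD page []

-- the inner two loops of A: walk the manual keeping the set of previous pages;
-- return False as soon as some rule target of the current page was already seen
def solveCheckA (rules : List (Int × List Int)) : List Int → PySem.Set Int → Bool
  | [], _ => true
  | page :: rest, prev =>
    if (pvGetRules rules page).any (fun illegal => PySem.Set.contains prev illegal) then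
      false
    else
      solveCheckA rules rest (PySem.Set.add prev page)

def solve (rules : List (Int × List Int)) (manuals : List (List Int)) : Int × List (List Int) :=
  manuals.foldl
    (fun st manual =>
      if solveCheckA rules manual PySem.Set.empty then
        -- manual[len(manual) // 2]; Pre_solve excludes the empty manual, where Python raises IndexError
        (st.1 + (PySem.List.pyGet? manual (PySem.Int.floordiv (manual.length : Int) 2)).getD 0, st.2)
      else
        (st.1, st.2 ++ [manual]))
    (0, [])

-- ===== PORT B =====
-- any(manual[i] in rules.get(manual[j], []) for j in range(n) for i in range(j));
-- indices satisfy i < j < n, so manual[j] / manual[i] are exact as getD with any default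
def solveBadB (rules : List (Int × List Int)) (manual : List Int) : Bool :=
  (List.range manual.length).any fun j =>
    (List.range j).any fun i =>
      (pvGetRules rules (manual.getD j 0)).contains (manual.getD i 0)

def solve_alt (rules : List (Int × List Int)) (manuals : List (List Int)) : Int × List (List Int) :=
  manuals.foldl
    (fun st manual =>
      if solveBadB rules manual then
        (st.1, st.2 ++ [manual])
      else
        -- manual[len(manual) // 2]; Pre_solve excludes the empty manual, where Python raises IndexError
        (st.1 + (PySem.List.pyGet? manual (PySem.Int.floordiv (manual.length : Int) 2)).getD 0, st.2))
    (0, [])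

-- ===== PRECONDITION & SPEC =====
-- Pre_ excludes input lists containing an empty manual: an empty manual is vacuously
-- "ordered" and Python A (and B alike) raises IndexError on manual[len(manual) // 2].
def Pre_solve (rules : List (Int × List Int)) (manuals : List (List Int)) : Prop :=
  ∀ m ∈ manuals, m ≠ []
instance (rules : List (Int × List Int)) (manuals : List (List Int)) : Decidable (Pre_solve rules manuals) := by unfold Pre_solve; infer_instance

def pvWitness_solve : (List (Int × List Int)) × List (List Int) :=
  ([(1, [2])], [[2, 1], [1, 2]])

def Spec_solve (rules : List (Int × List Int)) (manuals : List (List Int)) (out : Int × List (List Int)) : Prop := out = solve_alt rules manuals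
instance (rules : List (Int × List Int)) (manuals : List (List Int)) (out : Int × List (List Int)) : Decidable (Spec_solve rules manuals out) := by unfold Spec_solve; infer_instance

-- ===== CLAIM (what is proved, stated in full; the proofs are below) =====
def Claim_equal_solve : Prop := ∀ (rules : List (Int × List Int)) (manuals : List (List Int)), Dom_solve rules manuals → Pre_solve rules manuals → Spec_solve rules manuals (solve rules manuals)

-- ===== LEMMAS AND PROOFS =====

-- characterization of A's per-manual walk, generalized over the seen set
theorem solveCheckA_iff (rules : List (Int × List Int)) (l : List Int)
    (s : PySem.Set Int) :
    solveCheckA rules l s = true ↔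
      ∀ (k : Nat) (hk : k < l.length),
        ∀ b ∈ pvGetRules rules l[k], ¬ (b ∈ s ∨ b ∈ l.take k) := by
  induction l generalizing s with
  | nil => simp [solveCheckA]
  | cons x xs ih =>
    unfold solveCheckA
    by_cases hany : (pvGetRules rules x).any (fun illegal => PySem.Set.contains s illegal) = true
    · rw [if_pos hany]
      simp only [Bool.false_eq_true, false_iff]
      intro h
      simp only [List.any_eq_true] at hany
      obtain ⟨b, hb, hbs⟩ := hany
      exact h 0 (by simp) b hb (Or.inl (by simpa using hbs))
    · rw [if_neg hany, ih]
      simp only [List.any_eq_true, not_exists, not_and] at hany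
      constructor
      · intro h k hk b hb
        cases k with
        | zero =>
          simp only [List.take_zero, List.not_mem_nil, or_false]
          intro hbs
          exact hany b (by simpa using hb) (by simpa using hbs)
        | succ k =>
          have h2 := h k (by simpa using hk) b (by simpa using hb)
          rw [PySem.Set.mem_add] at h2
          simp only [List.take_succ_cons, List.mem_cons]
          tauto
      · intro h k hk b hb
        have h2 := h (k + 1) (by simpa using hk) b (by simpa using hb)
        rw [PySem.Set.mem_add]
        simp only [List.take_succ_cons, List.mem_cons] at h2
        tauto

-- membership in a prefix in terms of indices
theorem mem_take_iff_getElem (l : List Int) (k : Nat) (b : Int) :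
    b ∈ l.take k ↔ ∃ i, ∃ h : i < l.length, i < k ∧ l[i] = b := by
  constructor
  · intro h
    rw [List.mem_iff_getElem] at h
    obtain ⟨i, hi, hv⟩ := h
    have hi' : i < l.length := lt_of_lt_of_le hi (by simp)
    refine ⟨i, hi', ?_, ?_⟩
    · have := hi; simp at this; omega
    · rw [← hv, List.getElem_take]
  · rintro ⟨i, h, hik, rfl⟩
    rw [List.mem_iff_getElem]
    exact ⟨i, by simp; omega, by rw [List.getElem_take]⟩

-- characterization of B's pairwise check
theorem solveBadB_iff (rules : List (Int × List Int)) (manual : List Int) :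
    solveBadB rules manual = true ↔
      ∃ j, ∃ hj : j < manual.length, ∃ i, ∃ hij : i < j,
        manual[i]'(lt_trans hij hj) ∈ pvGetRules rules manual[j] := by
  unfold solveBadB
  simp only [List.any_eq_true, List.mem_range]
  constructor
  · rintro ⟨j, hj, i, hij, hc⟩
    have hi : i < manual.length := lt_trans hij hj
    rw [List.getD_eq_getElem _ _ hj, List.getD_eq_getElem _ _ hi] at hc
    exact ⟨j, hj, i, hij, by simpa using hc⟩
  · rintro ⟨j, hj, i, hij, hm⟩
    have hi : i < manual.length := lt_trans hij hj
    refine ⟨j, hj, i, hij, ?_⟩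
    rw [List.getD_eq_getElem _ _ hj, List.getD_eq_getElem _ _ hi]
    simpa using hm

-- the two per-manual tests are complementary
theorem check_eq (rules : List (Int × List Int)) (manual : List Int) :
    solveCheckA rules manual PySem.Set.empty = !solveBadB rules manual := by
  rw [Bool.eq_iff_iff, Bool.not_eq_true', ← Bool.not_eq_true, solveCheckA_iff, solveBadB_iff]
  constructor
  · rintro h ⟨j, hj, i, hij, hm⟩
    refine h j hj _ hm ?_
    rw [mem_take_iff_getElem]
    exact Or.inr ⟨i, lt_trans hij hj, hij, rfl⟩
  · intro h k hk b hb hmem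
    rcases hmem with hs | ht
    · simp [PySem.Set.empty] at hs
    · rw [mem_take_iff_getElem] at ht
      obtain ⟨i, hi, hik, rfl⟩ := ht
      exact h ⟨k, hk, i, hik, hb⟩

-- ===== VERDICT (by name: the statement is the Claim_ definition above) =====
theorem solve_spec : Claim_equal_solve := by
  intro rules manuals _ _
  unfold Spec_solve solve solve_alt
  simp only [check_eq, Bool.not_eq_eq_eq_not, Bool.not_true]
  congr 1
  funext st manual
  rcases h : solveBadB rules manual with _ | _ <;> simp [h]
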